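-- pv_equiv track=rewrite | github.com/mysterylektro/AdventOfCode | AOC2019/solutions/day10.py | is_blocked
-- ===== SOURCE A (Python) =====
-- import math
--
-- def normalize_vector(x, y):
--     gcd = math.gcd(x, y)
--     return x // gcd, y // gcd
--
-- def is_blocked(test_asteroid, asteroids):
--     normal_vector = normalize_vector(*test_asteroid)
--     if normal_vector[0] == 0:
--         points_between = test_asteroid[1] / normal_vector[1]
--     else:
--         points_between = test_asteroid[0] / normal_vector[0]
--
--     points_between = int(points_between)
--
--     if points_between > 1:
--         for j in range(1, points_between):
--             blocking_coord = normal_vector[0] * j, normal_vector[1] * j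
--             if blocking_coord in asteroids:
--                 return True
--
--     return False
-- ===== SOURCE B (Python) =====
-- import math
--
-- def is_blocked(test_asteroid, asteroids):
--     x, y = test_asteroid
--     g = math.gcd(x, y)
--     if g <= 1:
--         return False
--     nx, ny = x // g, y // g
--     for ax, ay in asteroids:
--         if nx != 0:
--             if ax % nx == 0:
--                 j = ax // nx
--                 if ay == ny * j and 1 <= j < g:
--                     return True
--         else:
--             if ax == 0 and ay % ny == 0:
--                 j = ay // ny
--                 if 1 <= j < g:
--                     return True
--     return False
-- ===== Notes on version B (the rewrite author's own statement) =====
-- stated objective: faster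
-- what changed: Instead of enumerating every lattice point on the sight line (range(1, points_between)) and testing membership in the asteroid list, B computes g = gcd once and makes a single pass over the asteroid list, reconstructing for each asteroid the integer multiple j of the direction vector and checking 1 <= j < g.
import Mathlib
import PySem

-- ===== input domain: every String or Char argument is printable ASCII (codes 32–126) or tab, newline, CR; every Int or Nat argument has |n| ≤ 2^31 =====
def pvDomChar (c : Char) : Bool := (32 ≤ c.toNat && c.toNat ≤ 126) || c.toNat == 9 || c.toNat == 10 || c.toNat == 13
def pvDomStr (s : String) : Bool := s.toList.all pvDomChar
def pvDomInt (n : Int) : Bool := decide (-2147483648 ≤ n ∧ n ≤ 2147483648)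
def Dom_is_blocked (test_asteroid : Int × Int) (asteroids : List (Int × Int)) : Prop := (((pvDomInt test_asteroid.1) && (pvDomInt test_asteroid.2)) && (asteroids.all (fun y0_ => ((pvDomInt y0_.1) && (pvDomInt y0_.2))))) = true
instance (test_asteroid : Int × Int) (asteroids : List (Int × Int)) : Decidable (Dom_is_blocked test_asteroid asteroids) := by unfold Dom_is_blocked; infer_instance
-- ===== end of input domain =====

-- B replaces A's scan over every lattice point of the sight line (O(gcd·n) membership tests)
-- by a single pass over the asteroid list, reconstructing the multiple j per asteroid (faster).


-- ===== PORT A =====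
def normalize_vector (x y : Int) : Int × Int :=
  let gcd : Int := Int.gcd x y
  (PySem.Int.floordiv x gcd, PySem.Int.floordiv y gcd)

def is_blocked (test_asteroid : Int × Int) (asteroids : List (Int × Int)) : Bool :=
  let normal_vector := normalize_vector test_asteroid.1 test_asteroid.2
  -- Python computes FLOAT division test_asteroid[i] / normal_vector[i], then int(). On Pre_
  -- (test_asteroid ≠ (0,0)) with |coords| ≤ 2^31 the divisor divides the numerator exactly and
  -- the true quotient is an integer ≤ 2^31, exactly representable as a float, so the correctly
  -- rounded float quotient IS that integer and int(a/b) = a//b; we port it as floordiv (exact there).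
  let points_between : Int :=
    if normal_vector.1 == 0 then PySem.Int.floordiv test_asteroid.2 normal_vector.2
    else PySem.Int.floordiv test_asteroid.1 normal_vector.1
  if points_between > 1 then
    (PySem.List.pyRange 1 points_between 1).any
      (fun j => asteroids.contains (normal_vector.1 * j, normal_vector.2 * j))
  else false

-- ===== PORT B =====
def is_blocked_alt (test_asteroid : Int × Int) (asteroids : List (Int × Int)) : Bool :=
  let g : Int := Int.gcd test_asteroid.1 test_asteroid.2
  if g ≤ 1 then false
  else
    let nx := PySem.Int.floordiv test_asteroid.1 g
    let ny := PySem.Int.floordiv test_asteroid.2 g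
    asteroids.any (fun a =>
      if nx ≠ 0 then
        if PySem.Int.mod a.1 nx == 0 then
          (a.2 == ny * PySem.Int.floordiv a.1 nx) &&
            (decide (1 ≤ PySem.Int.floordiv a.1 nx) && decide (PySem.Int.floordiv a.1 nx < g))
        else false
      else
        if a.1 == 0 && (PySem.Int.mod a.2 ny == 0) then
          decide (1 ≤ PySem.Int.floordiv a.2 ny) && decide (PySem.Int.floordiv a.2 ny < g)
        else false)

-- ===== PRECONDITION & SPEC =====
-- Pre_ excludes only test_asteroid = (0,0), where A raises ZeroDivisionError (x // math.gcd(0,0)).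
def Pre_is_blocked (test_asteroid : Int × Int) (asteroids : List (Int × Int)) : Prop :=
  test_asteroid ≠ (0, 0)
instance (test_asteroid : Int × Int) (asteroids : List (Int × Int)) : Decidable (Pre_is_blocked test_asteroid asteroids) := by unfold Pre_is_blocked; infer_instance

def pvWitness_is_blocked : (Int × Int) × (List (Int × Int)) := ((3, 6), [(1, 2)])

def Spec_is_blocked (test_asteroid : Int × Int) (asteroids : List (Int × Int)) (out : Bool) : Prop := out = is_blocked_alt test_asteroid asteroids
instance (test_asteroid : Int × Int) (asteroids : List (Int × Int)) (out : Bool) : Decidable (Spec_is_blocked test_asteroid asteroids out) := by unfold Spec_is_blocked; infer_instance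

-- ===== CLAIM (what is proved, stated in full; the proofs are below) =====
def Claim_equal_is_blocked : Prop := ∀ (test_asteroid : Int × Int) (asteroids : List (Int × Int)), Dom_is_blocked test_asteroid asteroids → Pre_is_blocked test_asteroid asteroids → Spec_is_blocked test_asteroid asteroids (is_blocked test_asteroid asteroids)

-- ===== LEMMAS AND PROOFS =====

-- exact floor division: (b*q) // b = q for b ≠ 0
theorem pv_fd_cancel (b q : Int) (hb : b ≠ 0) : PySem.Int.floordiv (b * q) b = q := by
  have hm : PySem.Int.mod (b * q) b = 0 := by
    rw [PySem.Int.mod_eq_zero_iff_dvd]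
    exact ⟨q, rfl⟩
  have h := PySem.Int.floordiv_mul_add_mod (b * q) b
  rw [hm, add_zero] at h
  have : PySem.Int.floordiv (b * q) b * b = q * b := by rw [h]; ring
  exact mul_right_cancel₀ hb this

-- a // b reconstructs a when b ∣ a
theorem pv_fd_exact (a b : Int) (hm : PySem.Int.mod a b = 0) :
    b * PySem.Int.floordiv a b = a := by
  have h := PySem.Int.floordiv_mul_add_mod a b
  rw [hm, add_zero] at h
  rw [mul_comm]; exact h

-- ===== VERDICT (by name: the statement is the Claim_ definition above) =====
theorem is_blocked_spec : Claim_equal_is_blocked := by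
  intro t ast _ hpre
  unfold Spec_is_blocked is_blocked is_blocked_alt normalize_vector
  obtain ⟨x, y⟩ := t
  simp only [Pre_is_blocked, ne_eq, Prod.mk.injEq, not_and] at hpre
  -- g > 0
  have hg0 : Int.gcd x y ≠ 0 := by
    intro h
    rcases Int.gcd_eq_zero_iff.mp h with ⟨hx, hy⟩
    exact (if hx0 : x = 0 then hpre hx0 hy else hx0 hx)
  set g : Int := (Int.gcd x y : Int) with hgdef
  have hgpos : 0 < g := by
    have h1 : 0 < Int.gcd x y := Nat.pos_of_ne_zero hg0
    rw [hgdef]; exact_mod_cast h1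
  have hdx : g ∣ x := hgdef ▸ Int.gcd_dvd_left x y
  have hdy : g ∣ y := hgdef ▸ Int.gcd_dvd_right x y
  obtain ⟨nx, hnx⟩ := hdx
  obtain ⟨ny, hny⟩ := hdy
  have hgne : g ≠ 0 := ne_of_gt hgpos
  have hfx : PySem.Int.floordiv x g = nx := by rw [hnx]; exact pv_fd_cancel g nx hgne
  have hfy : PySem.Int.floordiv y g = ny := by rw [hny]; exact pv_fd_cancel g ny hgne
  simp only [hfx, hfy]
  -- points_between = g in either branch
  have hpb : (if nx == 0 then PySem.Int.floordiv y ny else PySem.Int.floordiv x nx) = g := by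
    by_cases h0 : nx = 0
    · have hx0 : x = 0 := by rw [hnx, h0, mul_zero]
      have hy0 : y ≠ 0 := hpre hx0
      have hny0 : ny ≠ 0 := by intro h; apply hy0; rw [hny, h, mul_zero]
      simp only [h0, beq_self_eq_true, if_true]
      rw [hny, mul_comm]; exact pv_fd_cancel ny g hny0
    · simp only [beq_iff_eq, h0, if_false]
      rw [hnx, mul_comm]; exact pv_fd_cancel nx g h0
  rw [hpb]
  by_cases hg1 : 1 < g
  case neg => rw [if_neg hg1, if_pos (not_lt.mp hg1)]
  case pos =>
    rw [if_pos hg1, if_neg (not_le.mpr hg1)]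
    -- both sides decide the same existence statement
    rw [Bool.eq_iff_iff]
    simp only [List.any_eq_true, PySem.List.mem_pyRange_one, List.contains_eq_mem,
      decide_eq_true_eq]
    constructor
    · rintro ⟨j, ⟨hj1, hjg⟩, hmem⟩
      refine ⟨(nx * j, ny * j), hmem, ?_⟩
      by_cases h0 : nx = 0
      · have hy0 : y ≠ 0 := hpre (by rw [hnx, h0, mul_zero])
        have hny0 : ny ≠ 0 := by intro h; apply hy0; rw [hny, h, mul_zero]
        have hm : PySem.Int.mod (ny * j) ny = 0 := by
          rw [PySem.Int.mod_eq_zero_iff_dvd]; exact ⟨j, rfl⟩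
        simp only [h0, ne_eq, not_true_eq_false, if_false, zero_mul, hm]
        rw [pv_fd_cancel ny j hny0]
        simp [hj1, hjg]
      · have hm : PySem.Int.mod (nx * j) nx = 0 := by
          rw [PySem.Int.mod_eq_zero_iff_dvd]; exact ⟨j, rfl⟩
        simp only [ne_eq, h0, not_false_eq_true, if_true, hm]
        rw [pv_fd_cancel nx j h0]
        simp [hj1, hjg]
    · rintro ⟨a, hmem, hP⟩
      by_cases h0 : nx = 0
      · simp only [h0, ne_eq, not_true_eq_false, if_false] at hP
        by_cases hcond : a.1 = 0 ∧ PySem.Int.mod a.2 ny = 0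
        · obtain ⟨ha1, hm⟩ := hcond
          have hrec : ny * PySem.Int.floordiv a.2 ny = a.2 := pv_fd_exact a.2 ny hm
          rw [if_pos (by simp [ha1, hm])] at hP
          simp only [Bool.and_eq_true, decide_eq_true_eq] at hP
          exact ⟨PySem.Int.floordiv a.2 ny, ⟨hP.1, hP.2⟩, by
            rw [h0, zero_mul, hrec, ← ha1]; simpa using hmem⟩
        · rw [if_neg (by simpa using fun h1 h2 => hcond ⟨by simpa using h1, by simpa using h2⟩)] at hP
          exact absurd hP (by simp)
      · simp only [ne_eq, h0, not_false_eq_true, if_true] at hP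
        by_cases hm : PySem.Int.mod a.1 nx = 0
        · rw [if_pos (by simp [hm])] at hP
          simp only [Bool.and_eq_true, decide_eq_true_eq, beq_iff_eq] at hP
          have hrec : nx * PySem.Int.floordiv a.1 nx = a.1 := pv_fd_exact a.1 nx hm
          exact ⟨PySem.Int.floordiv a.1 nx, ⟨hP.2.1, hP.2.2⟩, by
            rw [hrec, ← hP.1]; simpa using hmem⟩
        · rw [if_neg (by simpa using hm)] at hP
          exact absurd hP (by simp)
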